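-- pv_equiv track=rewrite | github.com/pypi-data/pypi-mirror-391 | packages/perpetual-context/perpetual_context-1.1.3-py3-none-any.whl/perpetual_context/perpetual_context.py | __getTableSummary
-- ===== SOURCE A (Python) =====
-- def __getTableSummary(_table=[], _column_metrics=[], _metrics_indexes=()):
--     result_table = []
--     if len(_metrics_indexes) > 0:
--         for index_x, column_metric in enumerate(_column_metrics):
--             temporary_metric = []
--             for index_y, metric in enumerate(column_metric):
--                 if index_y in _metrics_indexes: temporary_metric.append(metric)
--             _column_metrics[index_x] = tuple(temporary_metric)
--     for column_index, column_metric in enumerate(_column_metrics):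
--         for row in _table:
--             column = list(zip(*result_table))[column_index] if len(result_table) > 0 else []
--             if row[column_index] in column_metric and row[column_index] not in column and row not in result_table: result_table.append(row)
--     return result_table
-- ===== SOURCE B (Python) =====
-- # Alternative re-implementation via a shrinking worklist: rows already emitted
-- # are removed from the scan entirely, and every emitted row immediately books
-- # its value into a per-column "used value" table for all columns, so no column
-- # of the growing result is ever recomputed or rescanned.  Mutates
-- # _column_metrics in place like A does.
-- def __getTableSummary(_table=[], _column_metrics=[], _metrics_indexes=()):
--     if len(_metrics_indexes) > 0:
--         for i, cm in enumerate(_column_metrics):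
--             _column_metrics[i] = tuple(m for j, m in enumerate(cm) if j in _metrics_indexes)
--     ncols = len(_column_metrics)
--     used = [set() for _ in range(ncols)]   # used[c] = values at column c of emitted rows
--     remaining = list(_table)               # rows not yet emitted, in table order
--     result = []
--     for c, cm in enumerate(_column_metrics):
--         cm_set = set(cm)
--         new_remaining = []
--         emitted = []                       # rows emitted during this column pass
--         for r in remaining:
--             v = r[c]
--             if v in cm_set and v not in used[c]:
--                 result.append(r)
--                 emitted.append(r)
--                 for c2 in range(ncols):
--                     used[c2].add(r[c2])
--             elif r not in emitted:         # drop duplicates of a row emitted this pass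
--                 new_remaining.append(r)
--         remaining = new_remaining
--     return result
-- ===== Notes on version B (the rewrite author's own statement) =====
-- stated objective: alternative
-- what changed: B scans a shrinking worklist of not-yet-emitted rows and, on emitting a row, immediately books its value at every column into per-column used-value tables, so the growing result is never re-transposed or rescanned; A re-builds zip(*result_table) and linearly scans result_table for every (column,row) pair.
import Mathlib
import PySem

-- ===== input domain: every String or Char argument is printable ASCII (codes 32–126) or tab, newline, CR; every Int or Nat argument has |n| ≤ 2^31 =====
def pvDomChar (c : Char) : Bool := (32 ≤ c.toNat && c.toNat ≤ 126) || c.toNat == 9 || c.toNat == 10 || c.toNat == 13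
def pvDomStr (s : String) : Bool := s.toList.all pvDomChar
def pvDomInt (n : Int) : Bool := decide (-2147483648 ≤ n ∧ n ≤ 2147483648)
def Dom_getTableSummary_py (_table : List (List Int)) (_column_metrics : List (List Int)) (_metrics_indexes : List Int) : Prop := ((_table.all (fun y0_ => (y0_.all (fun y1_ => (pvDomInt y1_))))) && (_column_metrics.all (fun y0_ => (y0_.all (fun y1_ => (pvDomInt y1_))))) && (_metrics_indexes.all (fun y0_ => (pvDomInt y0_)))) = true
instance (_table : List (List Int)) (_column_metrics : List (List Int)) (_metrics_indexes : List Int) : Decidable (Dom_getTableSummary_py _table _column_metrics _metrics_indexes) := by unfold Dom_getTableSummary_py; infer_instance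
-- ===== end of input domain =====

-- B replaces A's per-(column,row) re-transposition and rescans of the growing result by a
-- shrinking worklist of not-yet-emitted rows plus per-column used-value tables updated once
-- per emitted row (alternative algorithm, same measured cost); both A and B mutate
-- _column_metrics in place identically, the equivalence proved here is about the return value.

-- ===== PORT A =====

-- zip(*rows), transliterated with fuel = length of the first row
-- (zip stops at the shortest row, whose length is ≤ the first row's).
def pvZipStarAux : Nat → List (List Int) → List (List Int)
  | 0, _ => []
  | n+1, rows =>
    if rows.isEmpty || rows.any List.isEmpty then []
    else (rows.map (fun r => r.headD 0)) :: pvZipStarAux n (rows.map List.tail)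

def pvZipStar (rows : List (List Int)) : List (List Int) :=
  pvZipStarAux (rows.headD []).length rows

-- A's metric filtering: the 'if len(_metrics_indexes) > 0: …' loop rebuilding each column_metric
def pvFilterCMsA (mi : List Int) (cms : List (List Int)) : List (List Int) :=
  if mi.length > 0 then
    cms.map (fun cm => ((PySem.List.enumerate cm).filter (fun p => mi.contains p.1)).map (·.2))
  else cms

-- body of A's inner 'for row in _table' loop
def pvStepA (c : Int) (cm : List Int) (rt : List (List Int)) (row : List Int) : List (List Int) :=
  let column : List Int := if rt.length > 0 then PySem.List.pyGetD (pvZipStar rt) c [] else []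
  let v := PySem.List.pyGetD row c 0
  if cm.contains v && !(column.contains v) && !(rt.contains row) then rt ++ [row] else rt

def getTableSummary_py (_table : List (List Int)) (_column_metrics : List (List Int)) (_metrics_indexes : List Int) : List (List Int) :=
  (PySem.List.enumerate (pvFilterCMsA _metrics_indexes _column_metrics)).foldl
    (fun rt p => _table.foldl (pvStepA p.1 p.2) rt) []

-- ===== PORT B =====

-- B's metric filtering: the same rebuild, written as Source B's comprehension
def pvFilterCMsB (mi : List Int) (cms : List (List Int)) : List (List Int) :=
  if mi.length > 0 then
    cms.map (fun cm => ((PySem.List.enumerate cm).filter (fun p => mi.contains p.1)).map (·.2))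
  else cms

-- 'for c2 in range(ncols): used[c2].add(r[c2])' — indices of range(ncols) are in range,
-- so List.set / List.getD are exact for the Python list update / read
def pvBookUsed (ncols : Nat) (r : List Int) (used : List (PySem.Set Int)) : List (PySem.Set Int) :=
  (List.range ncols).foldl
    (fun u c2 => u.set c2 (PySem.Set.add (u.getD c2 PySem.Set.empty) (PySem.List.pyGetD r (c2 : Int) 0))) used

-- body of B's inner 'for r in remaining' loop; state = (result, used, new_remaining, emitted)
def pvStepB (ncols : Nat) (c : Int) (cmSet : PySem.Set Int)
    (st : List (List Int) × List (PySem.Set Int) × List (List Int) × List (List Int))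
    (r : List Int) :
    List (List Int) × List (PySem.Set Int) × List (List Int) × List (List Int) :=
  let v := PySem.List.pyGetD r c 0
  if PySem.Set.contains cmSet v && !(PySem.Set.contains (PySem.List.pyGetD st.2.1 c PySem.Set.empty) v)
  then (st.1 ++ [r], pvBookUsed ncols r st.2.1, st.2.2.1, st.2.2.2 ++ [r])
  else if !(st.2.2.2.contains r) then (st.1, st.2.1, st.2.2.1 ++ [r], st.2.2.2)
  else st

def getTableSummary_py_alt (_table : List (List Int)) (_column_metrics : List (List Int)) (_metrics_indexes : List Int) : List (List Int) :=
  let cms := pvFilterCMsB _metrics_indexes _column_metrics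
  let ncols := cms.length
  ((PySem.List.enumerate cms).foldl
    (fun st p =>
      let inner := st.2.2.foldl (pvStepB ncols p.1 (PySem.Set.ofList p.2)) (st.1, st.2.1, [], [])
      (inner.1, inner.2.1, inner.2.2.1))
    (([] : List (List Int)), (List.range ncols).map (fun _ => (PySem.Set.empty : PySem.Set Int)), _table)).1

-- ===== PRECONDITION & SPEC =====
-- Pre_ excludes exactly the inputs on which A raises IndexError: a row of _table
-- shorter than the number of metric columns (row[column_index] / the transposed-column access).
def Pre_getTableSummary_py (_table : List (List Int)) (_column_metrics : List (List Int)) (_metrics_indexes : List Int) : Prop :=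
  ∀ row ∈ _table, _column_metrics.length ≤ row.length
instance (_table : List (List Int)) (_column_metrics : List (List Int)) (_metrics_indexes : List Int) : Decidable (Pre_getTableSummary_py _table _column_metrics _metrics_indexes) := by unfold Pre_getTableSummary_py; infer_instance

def pvWitness_getTableSummary_py : List (List Int) × List (List Int) × List Int :=
  ([[1, 2], [3, 4], [1, 4]], [[1, 3], [2, 4]], [0, 1])

def Spec_getTableSummary_py (_table : List (List Int)) (_column_metrics : List (List Int)) (_metrics_indexes : List Int) (out : List (List Int)) : Prop := out = getTableSummary_py_alt _table _column_metrics _metrics_indexes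
instance (_table : List (List Int)) (_column_metrics : List (List Int)) (_metrics_indexes : List Int) (out : List (List Int)) : Decidable (Spec_getTableSummary_py _table _column_metrics _metrics_indexes out) := by unfold Spec_getTableSummary_py; infer_instance

-- ===== CLAIM (what is proved, stated in full; the proofs are below) =====
def Claim_equal_getTableSummary_py : Prop := ∀ (_table : List (List Int)) (_column_metrics : List (List Int)) (_metrics_indexes : List Int), Dom_getTableSummary_py _table _column_metrics _metrics_indexes → Pre_getTableSummary_py _table _column_metrics _metrics_indexes → Spec_getTableSummary_py _table _column_metrics _metrics_indexes (getTableSummary_py _table _column_metrics _metrics_indexes)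

-- ===== LEMMAS AND PROOFS =====

-- values of the result's column k (proof-only abbreviation)
def pvColVals (res : List (List Int)) (k : Int) : List Int :=
  res.map (fun t => PySem.List.pyGetD t k 0)

theorem pv_contains_ofList {α : Type} [BEq α] [LawfulBEq α] (l : List α) (x : α) :
    PySem.Set.contains (PySem.Set.ofList l) x = l.contains x := by
  simp [PySem.Set.contains_eq_listContains, PySem.Set.mem_ofList]

theorem pv_contains_add {α : Type} [BEq α] [LawfulBEq α] (s : PySem.Set α) (a x : α) :
    PySem.Set.contains (PySem.Set.add s a) x = (PySem.Set.contains s x || x == a) := by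
  simp only [PySem.Set.contains_eq_listContains]
  by_cases h : x = a <;> by_cases h2 : x ∈ s <;> simp [h, h2]

theorem pv_zipStarAux_getD (fuel : Nat) :
    ∀ (rows : List (List Int)) (k : Nat), rows ≠ [] → (∀ r ∈ rows, k < r.length) → k < fuel →
    (pvZipStarAux fuel rows).getD k [] = rows.map (fun r => r.getD k 0) := by
  induction fuel with
  | zero => intro rows k _ _ h; omega
  | succ n ih =>
    intro rows k hne hlen hk
    have hcond : (rows.isEmpty || rows.any List.isEmpty) = false := by
      simp only [Bool.or_eq_false_iff, List.isEmpty_eq_false_iff, List.any_eq_false]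
      refine ⟨hne, fun r hr => ?_⟩
      have := hlen r hr
      simp [List.isEmpty_iff]
      intro h; subst h; simp at this
    rw [pvZipStarAux, hcond]
    simp only [Bool.false_eq_true, if_false]
    cases k with
    | zero =>
      simp only [List.getD_cons_zero]
      exact List.map_congr_left (fun r hr => by
        cases r with
        | nil => have := hlen _ hr; simp_all
        | cons a t => simp)
    | succ k =>
      simp only [List.getD_cons_succ]
      rw [ih (rows.map List.tail) k]
      · rw [List.map_map]
        exact List.map_congr_left (fun r hr => by
          cases r with
          | nil => have := hlen _ hr; simp_all
          | cons a t => simp)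
      · simp [List.map_eq_nil_iff]; exact hne
      · intro r hr
        simp only [List.mem_map] at hr
        obtain ⟨r0, hr0, rfl⟩ := hr
        have := hlen r0 hr0
        cases r0 <;> simp_all
      · omega

theorem pv_colA_eq (res : List (List Int)) (c : Int) (hc : 0 ≤ c)
    (hlen : ∀ r ∈ res, c < (r.length : Int)) :
    (if res.length > 0 then PySem.List.pyGetD (pvZipStar res) c [] else []) = pvColVals res c := by
  unfold pvColVals
  cases res with
  | nil => simp
  | cons r0 rest =>
    simp only [List.length_cons, gt_iff_lt, Nat.succ_pos, if_true]
    obtain ⟨k, rfl⟩ : ∃ k : Nat, c = (k : Int) := ⟨c.toNat, (Int.toNat_of_nonneg hc).symm⟩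
    rw [PySem.List.pyGetD_natCast]
    rw [pvZipStar, pv_zipStarAux_getD]
    · exact (List.map_congr_left (fun r hr => by rw [PySem.List.pyGetD_natCast])).symm
    · simp
    · intro r hr; have := hlen r hr; exact_mod_cast this
    · have := hlen r0 (by simp); simp at this ⊢; omega

-- stepA is the identity or appends its row
theorem pv_stepA_or (c : Int) (cm : List Int) (res : List (List Int)) (row : List Int) :
    pvStepA c cm res row = res ∨ pvStepA c cm res row = res ++ [row] := by
  simp only [pvStepA]; split_ifs <;> simp

-- a row already in the accumulator is a no-op for stepA
theorem pv_stepA_mem (c : Int) (cm : List Int) (res : List (List Int)) (row : List Int)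
    (h : row ∈ res) : pvStepA c cm res row = res := by
  simp only [pvStepA]
  simp
  intro _ _
  exact h

-- stepA only ever appends
theorem pv_foldA_mono (c : Int) (cm : List Int) :
    ∀ (rows res : List (List Int)),
    ∃ ext, rows.foldl (pvStepA c cm) res = res ++ ext ∧ ∀ r ∈ ext, r ∈ rows := by
  intro rows
  induction rows with
  | nil => intro res; exact ⟨[], by simp, by simp⟩
  | cons row rest ih =>
    intro res
    rcases pv_stepA_or c cm res row with h | h <;> rw [List.foldl_cons, h]
    · obtain ⟨ext, he, hm⟩ := ih res
      exact ⟨ext, he, fun r hr => List.mem_cons_of_mem _ (hm r hr)⟩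
    · obtain ⟨ext, he, hm⟩ := ih (res ++ [row])
      refine ⟨row :: ext, by simpa using he, fun r hr => ?_⟩
      rcases List.mem_cons.mp hr with h' | h'
      · exact h' ▸ List.mem_cons_self
      · exact List.mem_cons_of_mem _ (hm r h')

-- rows already in res0 ⊆ res are no-ops for stepA
theorem pv_foldA_skip (c : Int) (cm : List Int) (res0 : List (List Int)) :
    ∀ (rows res : List (List Int)), (∀ x ∈ res0, x ∈ res) →
    rows.foldl (pvStepA c cm) res = (rows.filter (fun r => !res0.contains r)).foldl (pvStepA c cm) res := by
  intro rows
  induction rows with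
  | nil => intro res _; rfl
  | cons row rest ih =>
    intro res hsub
    by_cases h0 : row ∈ res0
    · have hc : res0.contains row = true := by simpa [List.contains_iff_mem] using h0
      rw [List.foldl_cons, pv_stepA_mem c cm res row (hsub row h0)]
      simp only [List.filter_cons, hc, Bool.not_true]
      exact ih res hsub
    · have hc : res0.contains row = false := by simpa [List.contains_iff_mem] using h0
      simp only [List.foldl_cons, List.filter_cons, hc, Bool.not_false, List.foldl_cons]
      refine ih (pvStepA c cm res row) (fun x hx => ?_)
      rcases pv_stepA_or c cm res row with h | h <;> rw [h]
      · exact hsub x hx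
      · exact List.mem_append_left _ (hsub x hx)

-- a row whose column-c value is not admissible any more can never be appended later
theorem pv_foldA_not_mem (c : Int) (hc : 0 ≤ c) (cm : List Int) (r : List Int) :
    ∀ (rows res : List (List Int)),
    (∀ t ∈ res, c < (t.length : Int)) → (∀ t ∈ rows, c < (t.length : Int)) →
    (cm.contains (PySem.List.pyGetD r c 0) = false ∨ (PySem.List.pyGetD r c 0) ∈ pvColVals res c) →
    r ∉ res → r ∉ rows.foldl (pvStepA c cm) res := by
  intro rows
  induction rows with
  | nil => intro res _ _ _ hnm; simpa using hnm
  | cons q rest ih =>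
    intro res hres hrows hyp hnm
    have hcol := pv_colA_eq res c hc hres
    rcases Bool.eq_false_or_eq_true (cm.contains (PySem.List.pyGetD q c 0)
        && !((if res.length > 0 then PySem.List.pyGetD (pvZipStar res) c [] else []).contains (PySem.List.pyGetD q c 0))
        && !(res.contains q)) with hb | hb
    swap
    · have hA : pvStepA c cm res q = res := by simp only [pvStepA]; rw [hb]; rfl
      rw [List.foldl_cons, hA]
      exact ih res hres (fun t ht => hrows t (List.mem_cons_of_mem _ ht)) hyp hnm
    · have hA : pvStepA c cm res q = res ++ [q] := by simp only [pvStepA]; rw [hb]; rfl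
      rw [List.foldl_cons, hA]
      have h1 : cm.contains (PySem.List.pyGetD q c 0) = true := by
        rcases (Bool.and_eq_true _ _).mp hb with ⟨x, _⟩
        rcases (Bool.and_eq_true _ _).mp x with ⟨x1, _⟩; exact x1
      have h2 : (pvColVals res c).contains (PySem.List.pyGetD q c 0) = false := by
        rcases (Bool.and_eq_true _ _).mp hb with ⟨x, _⟩
        rcases (Bool.and_eq_true _ _).mp x with ⟨_, z⟩
        rw [← hcol]
        simpa only [Bool.not_eq_true'] using z
      have h2' : PySem.List.pyGetD q c 0 ∉ pvColVals res c := by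
        intro hy
        have hmem : (pvColVals res c).contains (PySem.List.pyGetD q c 0) = true := by
          simpa [List.contains_iff_mem] using hy
        rw [h2] at hmem; cases hmem
      have hne : r ≠ q := by
        intro h; subst h
        rcases hyp with hy | hy
        · rw [h1] at hy; cases hy
        · exact h2' hy
      refine ih (res ++ [q]) (fun t ht => ?_) (fun t ht => hrows t (List.mem_cons_of_mem _ ht)) ?_ ?_
      · rcases List.mem_append.mp ht with h' | h'
        · exact hres t h'
        · simp at h'; subst h'; exact hrows t List.mem_cons_self
      · rcases hyp with hy | hy
        · exact Or.inl hy
        · refine Or.inr ?_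
          unfold pvColVals at hy ⊢
          rw [List.map_append]
          exact List.mem_append_left _ hy
      · simp only [List.mem_append, List.mem_singleton]
        rintro (h' | h')
        · exact hnm h'
        · exact hne h'

theorem pv_setfold_length (w : Nat → Int) :
    ∀ (n : Nat) (u : List (PySem.Set Int)),
    ((List.range n).foldl (fun u c2 => u.set c2 (PySem.Set.add (u.getD c2 PySem.Set.empty) (w c2))) u).length = u.length := by
  intro n
  induction n with
  | zero => intro u; simp
  | succ n ih =>
    intro u
    rw [List.range_succ, List.foldl_append]
    simp only [List.foldl_cons, List.foldl_nil, List.length_set]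
    exact ih u

theorem pv_setfold_unchanged (w : Nat → Int) :
    ∀ (n : Nat) (u : List (PySem.Set Int)) (j : Nat), n ≤ j →
    ((List.range n).foldl (fun u c2 => u.set c2 (PySem.Set.add (u.getD c2 PySem.Set.empty) (w c2))) u).getD j PySem.Set.empty = u.getD j PySem.Set.empty := by
  intro n
  induction n with
  | zero => intro u j _; simp
  | succ n ih =>
    intro u j hj
    rw [List.range_succ, List.foldl_append]
    simp only [List.foldl_cons, List.foldl_nil]
    rw [List.getD_eq_getElem?_getD, List.getElem?_set_ne (by omega), ← List.getD_eq_getElem?_getD]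
    exact ih u j (by omega)

theorem pv_setfold_getD (w : Nat → Int) :
    ∀ (n : Nat) (u : List (PySem.Set Int)) (j : Nat), j < n → j < u.length →
    ((List.range n).foldl (fun u c2 => u.set c2 (PySem.Set.add (u.getD c2 PySem.Set.empty) (w c2))) u).getD j PySem.Set.empty
      = PySem.Set.add (u.getD j PySem.Set.empty) (w j) := by
  intro n
  induction n with
  | zero => intro u j hj _; omega
  | succ n ih =>
    intro u j hjn hju
    rw [List.range_succ, List.foldl_append]
    simp only [List.foldl_cons, List.foldl_nil]
    by_cases hj : j = n
    · subst hj
      have hlen : j < ((List.range j).foldl (fun u c2 => u.set c2 (PySem.Set.add (u.getD c2 PySem.Set.empty) (w c2))) u).length := by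
        rw [pv_setfold_length]; exact hju
      rw [List.getD_eq_getElem?_getD, List.getElem?_set_self hlen]
      simp only [Option.getD_some]
      rw [pv_setfold_unchanged w j u j le_rfl]
    · rw [List.getD_eq_getElem?_getD, List.getElem?_set_ne (by omega), ← List.getD_eq_getElem?_getD]
      exact ih u j (by omega) hju

theorem pv_book_length (ncols : Nat) (r : List Int) (used : List (PySem.Set Int)) :
    (pvBookUsed ncols r used).length = used.length :=
  pv_setfold_length _ ncols used

theorem pv_book_getD (ncols : Nat) (r : List Int) (used : List (PySem.Set Int))
    (h : used.length = ncols) (j : Nat) (hj : j < ncols) :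
    (pvBookUsed ncols r used).getD j PySem.Set.empty
      = PySem.Set.add (used.getD j PySem.Set.empty) (PySem.List.pyGetD r (j : Int) 0) :=
  pv_setfold_getD _ ncols used j hj (by omega)

theorem pv_contains_true {α : Type} [BEq α] [LawfulBEq α] {l : List α} {x : α} (h : x ∈ l) :
    l.contains x = true := by simpa [List.contains_iff_mem] using h

theorem pv_contains_false {α : Type} [BEq α] [LawfulBEq α] {l : List α} {x : α} (h : x ∉ l) :
    l.contains x = false := by
  cases hc : l.contains x
  · rfl
  · exact absurd (by simpa [List.contains_iff_mem] using hc) h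

theorem pv_contains_append_singleton {α : Type} [BEq α] [LawfulBEq α] (l : List α) (a x : α) :
    (l ++ [a]).contains x = (l.contains x || x == a) := by
  by_cases h1 : x ∈ l <;> by_cases h2 : x = a <;> simp [h1, h2]

theorem pv_colVals_append (res : List (List Int)) (r : List Int) (c : Int) :
    pvColVals (res ++ [r]) c = pvColVals res c ++ [PySem.List.pyGetD r c 0] := by
  simp [pvColVals]

-- the big inner-pass lemma: one column pass of B versus one column pass of A
theorem pv_inner (ncols : Nat) (k : Nat) (hk : k < ncols) (cm : List Int) :
    ∀ (rem res : List (List Int)) (used : List (PySem.Set Int)) (nr em : List (List Int)),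
    used.length = ncols →
    (∀ c2 : Nat, c2 < ncols → ∀ x : Int,
      PySem.Set.contains (used.getD c2 PySem.Set.empty) x = (pvColVals res (c2 : Int)).contains x) →
    (∀ r ∈ em, r ∈ res) →
    (∀ r ∈ rem, r ∈ res → r ∈ em) →
    (∀ r ∈ res, (k : Int) < (r.length : Int)) →
    (∀ r ∈ rem, (k : Int) < (r.length : Int)) →
    (rem.foldl (pvStepB ncols (k : Int) (PySem.Set.ofList cm)) (res, used, nr, em)).1
        = rem.foldl (pvStepA (k : Int) cm) res ∧
    (rem.foldl (pvStepB ncols (k : Int) (PySem.Set.ofList cm)) (res, used, nr, em)).2.1.length = ncols ∧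
    (∀ c2 : Nat, c2 < ncols → ∀ x : Int,
      PySem.Set.contains ((rem.foldl (pvStepB ncols (k : Int) (PySem.Set.ofList cm)) (res, used, nr, em)).2.1.getD c2 PySem.Set.empty) x
        = (pvColVals (rem.foldl (pvStepA (k : Int) cm) res) (c2 : Int)).contains x) ∧
    (rem.foldl (pvStepB ncols (k : Int) (PySem.Set.ofList cm)) (res, used, nr, em)).2.2.1
        = nr ++ rem.filter (fun r => !((rem.foldl (pvStepA (k : Int) cm) res).contains r)) := by
  intro rem
  induction rem with
  | nil =>
    intro res used nr em hul hU hem hne hres hrem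
    exact ⟨rfl, hul, hU, by simp⟩
  | cons r rest ih =>
    intro res used nr em hul hU hem hne hres hrem
    have hk0 : (0 : Int) ≤ (k : Int) := Int.natCast_nonneg k
    have hcol := pv_colA_eq res (k : Int) hk0 hres
    have hcond : (PySem.Set.contains (PySem.Set.ofList cm) (PySem.List.pyGetD r (k : Int) 0)
          && !(PySem.Set.contains (PySem.List.pyGetD used ((k : Nat) : Int) PySem.Set.empty) (PySem.List.pyGetD r (k : Int) 0)))
        = (cm.contains (PySem.List.pyGetD r (k : Int) 0)
          && !((pvColVals res (k : Int)).contains (PySem.List.pyGetD r (k : Int) 0))) := by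
      simp only [pv_contains_ofList, PySem.List.pyGetD_natCast, hU k hk]
    by_cases hb : (cm.contains (PySem.List.pyGetD r (k : Int) 0)
          && !((pvColVals res (k : Int)).contains (PySem.List.pyGetD r (k : Int) 0))) = true
    · -- r is emitted
      have hcm : cm.contains (PySem.List.pyGetD r (k : Int) 0) = true := ((Bool.and_eq_true _ _).mp hb).1
      have hvn : (pvColVals res (k : Int)).contains (PySem.List.pyGetD r (k : Int) 0) = false := by
        have := ((Bool.and_eq_true _ _).mp hb).2
        simpa only [Bool.not_eq_true'] using this
      have hrnot : r ∉ res := by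
        intro hmem
        have hv : PySem.List.pyGetD r (k : Int) 0 ∈ pvColVals res (k : Int) :=
          List.mem_map.mpr ⟨r, hmem, rfl⟩
        rw [pv_contains_true hv] at hvn; cases hvn
      have hrc : res.contains r = false := pv_contains_false hrnot
      have hB : pvStepB ncols (k : Int) (PySem.Set.ofList cm) (res, used, nr, em) r
          = (res ++ [r], pvBookUsed ncols r used, nr, em ++ [r]) := by
        simp only [pvStepB]; rw [hcond, hb]; rfl
      have hA : pvStepA (k : Int) cm res r = res ++ [r] := by
        simp only [pvStepA]; rw [hcol]
        have hx : (cm.contains (PySem.List.pyGetD r (k : Int) 0)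
            && !((pvColVals res (k : Int)).contains (PySem.List.pyGetD r (k : Int) 0))
            && !(res.contains r)) = true := by rw [hcm, hvn, hrc]; rfl
        rw [hx]; rfl
      have hU' : ∀ c2 : Nat, c2 < ncols → ∀ x : Int,
          PySem.Set.contains ((pvBookUsed ncols r used).getD c2 PySem.Set.empty) x
            = (pvColVals (res ++ [r]) (c2 : Int)).contains x := by
        intro c2 hc2 x
        rw [pv_book_getD ncols r used hul c2 hc2, pv_contains_add, hU c2 hc2,
          pv_colVals_append, pv_contains_append_singleton]
      have hem' : ∀ t ∈ em ++ [r], t ∈ res ++ [r] := by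
        intro t ht
        rcases List.mem_append.mp ht with h' | h'
        · exact List.mem_append_left _ (hem t h')
        · exact List.mem_append_right _ h'
      have hne' : ∀ t ∈ rest, t ∈ res ++ [r] → t ∈ em ++ [r] := by
        intro t ht hmem
        rcases List.mem_append.mp hmem with h' | h'
        · exact List.mem_append_left _ (hne t (List.mem_cons_of_mem _ ht) h')
        · exact List.mem_append_right _ h'
      have hres' : ∀ t ∈ res ++ [r], (k : Int) < (t.length : Int) := by
        intro t ht
        rcases List.mem_append.mp ht with h' | h'
        · exact hres t h'
        · simp at h'; subst h'; exact hrem t List.mem_cons_self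
      obtain ⟨ih1, ih2, ih3, ih4⟩ := ih (res ++ [r]) (pvBookUsed ncols r used) nr (em ++ [r])
        (by rw [pv_book_length]; exact hul) hU' hem' hne' hres'
        (fun t ht => hrem t (List.mem_cons_of_mem _ ht))
      simp only [List.foldl_cons]
      rw [hB, hA]
      refine ⟨ih1, ih2, ih3, ?_⟩
      rw [ih4]
      have hrin : r ∈ rest.foldl (pvStepA (k : Int) cm) (res ++ [r]) := by
        obtain ⟨ext, he, _⟩ := pv_foldA_mono (k : Int) cm rest (res ++ [r])
        rw [he]; simp
      simp [hrin]
    · -- r is not emitted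
      have hbf : (cm.contains (PySem.List.pyGetD r (k : Int) 0)
          && !((pvColVals res (k : Int)).contains (PySem.List.pyGetD r (k : Int) 0))) = false := by
        cases h : (cm.contains (PySem.List.pyGetD r (k : Int) 0)
          && !((pvColVals res (k : Int)).contains (PySem.List.pyGetD r (k : Int) 0)))
        · rfl
        · exact absurd h hb
      have hA : pvStepA (k : Int) cm res r = res := by
        simp only [pvStepA]; rw [hcol]
        have hx : (cm.contains (PySem.List.pyGetD r (k : Int) 0)
            && !((pvColVals res (k : Int)).contains (PySem.List.pyGetD r (k : Int) 0))
            && !(res.contains r)) = false := by rw [hbf, Bool.false_and]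
        rw [hx]; rfl
      by_cases hre : r ∈ em
      · -- duplicate of a row emitted this pass: dropped from the worklist
        have hrec : em.contains r = true := pv_contains_true hre
        have hB : pvStepB ncols (k : Int) (PySem.Set.ofList cm) (res, used, nr, em) r
            = (res, used, nr, em) := by
          simp only [pvStepB]; rw [hcond, hbf, hrec]; rfl
        obtain ⟨ih1, ih2, ih3, ih4⟩ := ih res used nr em hul hU hem
          (fun t ht => hne t (List.mem_cons_of_mem _ ht)) hres
          (fun t ht => hrem t (List.mem_cons_of_mem _ ht))
        simp only [List.foldl_cons]
        rw [hB, hA]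
        refine ⟨ih1, ih2, ih3, ?_⟩
        rw [ih4]
        have hrin : r ∈ rest.foldl (pvStepA (k : Int) cm) res := by
          obtain ⟨ext, he, _⟩ := pv_foldA_mono (k : Int) cm rest res
          rw [he]; exact List.mem_append_left _ (hem r hre)
        simp [hrin]
      · -- row kept in the worklist
        have hrec : em.contains r = false := pv_contains_false hre
        have hB : pvStepB ncols (k : Int) (PySem.Set.ofList cm) (res, used, nr, em) r
            = (res, used, nr ++ [r], em) := by
          simp only [pvStepB]; rw [hcond, hbf, hrec]; rfl
        have hrnot : r ∉ res := fun h => hre (hne r List.mem_cons_self h)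
        obtain ⟨ih1, ih2, ih3, ih4⟩ := ih res used (nr ++ [r]) em hul hU hem
          (fun t ht => hne t (List.mem_cons_of_mem _ ht)) hres
          (fun t ht => hrem t (List.mem_cons_of_mem _ ht))
        simp only [List.foldl_cons]
        rw [hB, hA]
        refine ⟨ih1, ih2, ih3, ?_⟩
        rw [ih4]
        have hyp2 : cm.contains (PySem.List.pyGetD r (k : Int) 0) = false
            ∨ PySem.List.pyGetD r (k : Int) 0 ∈ pvColVals res (k : Int) := by
          cases h1 : cm.contains (PySem.List.pyGetD r (k : Int) 0)
          · exact Or.inl rfl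
          · refine Or.inr ?_
            rw [h1, Bool.true_and] at hbf
            have : (pvColVals res (k : Int)).contains (PySem.List.pyGetD r (k : Int) 0) = true := by
              cases h2 : (pvColVals res (k : Int)).contains (PySem.List.pyGetD r (k : Int) 0)
              · rw [h2] at hbf; cases hbf
              · rfl
            simpa [List.contains_iff_mem] using this
        have hrA : r ∉ rest.foldl (pvStepA (k : Int) cm) res :=
          pv_foldA_not_mem (k : Int) hk0 cm r rest res hres
            (fun t ht => hrem t (List.mem_cons_of_mem _ ht)) hyp2 hrnot
        simp [hrA]

theorem pvFilterCMs_eq (mi : List Int) (cms : List (List Int)) :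
    pvFilterCMsB mi cms = pvFilterCMsA mi cms := rfl

theorem pvFilterCMsA_length (mi : List Int) (cms : List (List Int)) :
    (pvFilterCMsA mi cms).length = cms.length := by
  unfold pvFilterCMsA; split_ifs <;> simp

theorem pv_outer (tab : List (List Int)) (ncols : Nat)
    (htab : ∀ r ∈ tab, ncols ≤ r.length) :
    ∀ (ps : List (Int × List Int)) (res : List (List Int)) (used : List (PySem.Set Int)),
    (∀ p ∈ ps, ∃ k : Nat, p.1 = (k : Int) ∧ k < ncols) →
    used.length = ncols →
    (∀ c2 : Nat, c2 < ncols → ∀ x : Int,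
      PySem.Set.contains (used.getD c2 PySem.Set.empty) x = (pvColVals res (c2 : Int)).contains x) →
    (∀ r ∈ res, r ∈ tab) →
    (ps.foldl
      (fun st p =>
        let inner := st.2.2.foldl (pvStepB ncols p.1 (PySem.Set.ofList p.2)) (st.1, st.2.1, [], [])
        (inner.1, inner.2.1, inner.2.2.1))
      (res, used, tab.filter (fun r => !res.contains r))).1
      = ps.foldl (fun rt p => tab.foldl (pvStepA p.1 p.2) rt) res := by
  intro ps
  induction ps with
  | nil => intro res used _ _ _ _; rfl
  | cons p ps ih =>
    intro res used hps hul hU hsub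
    obtain ⟨pc, pcm⟩ := p
    obtain ⟨k, hpk, hk⟩ := hps (pc, pcm) List.mem_cons_self
    simp only at hpk
    subst hpk
    have hlen' : ∀ r ∈ tab, (k : Int) < (r.length : Int) := by
      intro r hr
      have h1 := htab r hr
      have h2 : (ncols : Int) ≤ (r.length : Int) := by exact_mod_cast h1
      have h3 : (k : Int) < (ncols : Int) := by exact_mod_cast hk
      omega
    have hres_len : ∀ r ∈ res, (k : Int) < (r.length : Int) := fun r hr => hlen' r (hsub r hr)
    have hrem_len : ∀ r ∈ tab.filter (fun r => !res.contains r), (k : Int) < (r.length : Int) :=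
      fun r hr => hlen' r (List.mem_of_mem_filter hr)
    have hrem_not : ∀ r ∈ tab.filter (fun r => !res.contains r), r ∈ res → r ∈ ([] : List (List Int)) := by
      intro r hr hmem
      have hf := List.of_mem_filter hr
      exact absurd hmem (by simpa [List.contains_iff_mem] using hf)
    obtain ⟨in1, in2, in3, in4⟩ := pv_inner ncols k hk pcm (tab.filter (fun r => !res.contains r))
      res used [] [] hul hU (by simp) hrem_not hres_len hrem_len
    have hAstep : tab.foldl (pvStepA ((k : Nat) : Int) pcm) res
        = (tab.filter (fun r => !res.contains r)).foldl (pvStepA ((k : Nat) : Int) pcm) res :=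
      pv_foldA_skip ((k : Nat) : Int) pcm res tab res (fun x hx => hx)
    obtain ⟨ext, hext, hextm⟩ := pv_foldA_mono ((k : Nat) : Int) pcm (tab.filter (fun r => !res.contains r)) res
    have hfilt : (tab.filter (fun r => !res.contains r)).filter
          (fun t => !(((tab.filter (fun r => !res.contains r)).foldl (pvStepA ((k : Nat) : Int) pcm) res).contains t))
        = tab.filter (fun t => !(((tab.filter (fun r => !res.contains r)).foldl (pvStepA ((k : Nat) : Int) pcm) res).contains t)) := by
      rw [List.filter_filter]
      refine List.filter_congr (fun a ha => ?_)
      by_cases hm : a ∈ (tab.filter (fun r => !res.contains r)).foldl (pvStepA ((k : Nat) : Int) pcm) res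
      · rw [pv_contains_true hm]; simp
      · have ha2 : a ∉ res := by
          intro hmem
          exact hm (by rw [hext]; exact List.mem_append_left _ hmem)
        rw [pv_contains_false hm, pv_contains_false ha2]; rfl
    have hsub' : ∀ r ∈ (tab.filter (fun r => !res.contains r)).foldl (pvStepA ((k : Nat) : Int) pcm) res, r ∈ tab := by
      intro r hr
      rw [hext] at hr
      rcases List.mem_append.mp hr with h' | h'
      · exact hsub r h'
      · exact List.mem_of_mem_filter (hextm r h')
    simp only [List.foldl_cons]
    rw [hAstep]
    rw [in1, in4, List.nil_append, hfilt]
    exact ih _ _ (fun q hq => hps q (List.mem_cons_of_mem _ hq)) in2 in3 hsub'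

-- ===== VERDICT (by name: the statement is the Claim_ definition above) =====
theorem getTableSummary_py_spec : Claim_equal_getTableSummary_py := by
  intro _table _column_metrics _metrics_indexes _ hpre
  unfold Pre_getTableSummary_py at hpre
  unfold Spec_getTableSummary_py getTableSummary_py getTableSummary_py_alt
  rw [pvFilterCMs_eq]
  simp only []
  have htab' : ∀ r ∈ _table, (pvFilterCMsA _metrics_indexes _column_metrics).length ≤ r.length := by
    intro r hr
    rw [pvFilterCMsA_length]
    exact hpre r hr
  have hps : ∀ p ∈ PySem.List.enumerate (pvFilterCMsA _metrics_indexes _column_metrics),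
      ∃ k : Nat, p.1 = (k : Int) ∧ k < (pvFilterCMsA _metrics_indexes _column_metrics).length := by
    intro p hp
    rw [PySem.List.mem_enumerate_iff] at hp
    obtain ⟨k, hklt, rfl⟩ := hp
    exact ⟨k, by simp, hklt⟩
  have hul0 : ((List.range (pvFilterCMsA _metrics_indexes _column_metrics).length).map
      (fun _ => (PySem.Set.empty : PySem.Set Int))).length = (pvFilterCMsA _metrics_indexes _column_metrics).length := by
    simp
  have hU0 : ∀ c2 : Nat, c2 < (pvFilterCMsA _metrics_indexes _column_metrics).length → ∀ x : Int,
      PySem.Set.contains (((List.range (pvFilterCMsA _metrics_indexes _column_metrics).length).map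
        (fun _ => (PySem.Set.empty : PySem.Set Int))).getD c2 PySem.Set.empty) x
        = (pvColVals ([] : List (List Int)) (c2 : Int)).contains x := by
    intro c2 hc2 x
    have he : ((List.range (pvFilterCMsA _metrics_indexes _column_metrics).length).map
        (fun _ => (PySem.Set.empty : PySem.Set Int))).getD c2 PySem.Set.empty = PySem.Set.empty := by
      rw [List.getD_eq_getElem?_getD]
      rw [List.getElem?_map]
      rw [List.getElem?_range hc2]
      rfl
    rw [he]
    simp [pvColVals, PySem.Set.empty, PySem.Set.contains]
  have h0 : _table.filter (fun r => !(([] : List (List Int)).contains r)) = _table := by simp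
  have hmain := pv_outer _table (pvFilterCMsA _metrics_indexes _column_metrics).length htab'
    (PySem.List.enumerate (pvFilterCMsA _metrics_indexes _column_metrics)) []
    ((List.range (pvFilterCMsA _metrics_indexes _column_metrics).length).map
      (fun _ => (PySem.Set.empty : PySem.Set Int)))
    hps hul0 hU0 (by simp)
  rw [h0] at hmain
  exact hmain.symm
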